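-- pv_equiv track=rewrite | github.com/vyas-research-group/PFAS_Radicals_Lab_Activity | utilities/module2_functions.py | format_text_indentation
-- ===== SOURCE A (Python) =====
-- def format_text_indentation(text : str) -> str:
--     newlines= []
--     for line in text.split("\n"):
--         if line[:4] == ' '*4 :
--             newlines.append(line[4:])
--         else:
--             newlines.append(line)
--     return "\n".join(newlines)
-- ===== SOURCE B (Python) =====
-- import re
--
-- def format_text_indentation(text: str) -> str:
--     # One regex pass: strip exactly four literal spaces at each line start.
--     return re.sub(r'(?m)^    ', '', text)
-- ===== Notes on version B (the rewrite author's own statement) =====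
-- stated objective: idiomatic
-- what changed: Replaced the split-on-newline / per-line loop / join pipeline with a single multiline-anchored regex substitution that deletes exactly four literal leading spaces at each line start in one pass.
import Mathlib
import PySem

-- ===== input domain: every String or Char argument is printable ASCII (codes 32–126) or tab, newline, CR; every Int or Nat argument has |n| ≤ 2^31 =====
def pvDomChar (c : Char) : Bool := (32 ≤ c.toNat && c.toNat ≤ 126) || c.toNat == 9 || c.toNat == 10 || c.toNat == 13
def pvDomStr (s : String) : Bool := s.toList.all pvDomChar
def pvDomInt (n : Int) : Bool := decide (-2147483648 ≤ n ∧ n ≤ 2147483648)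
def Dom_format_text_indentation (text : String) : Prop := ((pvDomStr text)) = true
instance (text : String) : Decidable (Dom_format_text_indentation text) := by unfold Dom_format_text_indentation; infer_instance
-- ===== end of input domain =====

-- B replaces A's split-on-newline / per-line loop / join pipeline with a single regex
-- substitution re.sub(r'(?m)^    ', '', text); objective: idiomatic (no intermediate line list).

-- ===== PORT A =====
-- A: split on "\n", per line strip a 4-space prefix (line[:4] == '    '), append, join.
def format_text_indentation (text : String) : String :=
  let newlines := (PySem.Chars.splitOn text.toList "\n".toList).foldl
    (fun acc line =>
      if PySem.Chars.slice line none (some 4) = "    ".toList then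
        acc ++ [PySem.Chars.slice line (some 4) none]
      else
        acc ++ [line]) []
  String.ofList (PySem.Chars.join "\n".toList newlines)

-- ===== PORT B =====
-- Hand-written port of Source B's regex substitution re.sub(r'(?m)^    ', '', text): a single
-- left-to-right scan that, at each line start, drops a literal four-space match and copies
-- the rest of the line up to (and including) the next '\n'; exact for this anchored
-- literal pattern (MULTILINE '^' = string start or the position after a '\n').
def stripIndentScan (cs : List Char) : List Char :=
  let cs1 := if cs.take 4 = [' ', ' ', ' ', ' '] then cs.drop 4 else cs
  match h : cs1.dropWhile (· ≠ '\n') with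
  | [] => cs1
  | _ :: rest => cs1.takeWhile (· ≠ '\n') ++ '\n' :: stripIndentScan rest
termination_by cs.length
decreasing_by
  have h1 : cs1.length ≤ cs.length := by
    by_cases h4 : cs.take 4 = [' ', ' ', ' ', ' '] <;> simp [cs1, h4]
  have h2 := List.length_dropWhile_le (fun c => decide (c ≠ '\n')) cs1
  rw [h] at h2
  simp at h2
  omega

def format_text_indentation_alt (text : String) : String :=
  String.ofList (stripIndentScan text.toList)

-- ===== PRECONDITION & SPEC =====
def Spec_format_text_indentation (text : String) (out : String) : Prop := out = format_text_indentation_alt text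
instance (text : String) (out : String) : Decidable (Spec_format_text_indentation text out) := by unfold Spec_format_text_indentation; infer_instance

-- ===== CLAIM (what is proved, stated in full; the proofs are below) =====
def Claim_equal_format_text_indentation : Prop := ∀ (text : String), Dom_format_text_indentation text → Spec_format_text_indentation text (format_text_indentation text)

-- ===== LEMMAS AND PROOFS =====

-- A's per-line transformation, extracted.
def pvLineF (line : List Char) : List Char :=
  if line.take 4 = [' ', ' ', ' ', ' '] then line.drop 4 else line

-- reference splitter: Python's s.split("\n") as plain structural recursion
def pvSplit (pre : List Char) : List Char → List (List Char)
  | [] => [pre]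
  | c :: rest => if c = '\n' then pre :: pvSplit [] rest else pvSplit (pre ++ [c]) rest

theorem splitOn_go_eq (fuel : Nat) : ∀ (l cur : List Char) (accs : List (List Char)),
    l.length ≤ fuel →
    PySem.Chars.splitOn.go ['\n'] fuel l cur accs = accs.reverse ++ pvSplit cur.reverse l := by
  induction fuel with
  | zero =>
    intro l cur accs hl
    have : l = [] := by cases l <;> simp_all
    subst this
    simp [PySem.Chars.splitOn.go, pvSplit]
  | succ n ih =>
    intro l cur accs hl
    cases l with
    | nil => simp [PySem.Chars.splitOn.go, pvSplit]
    | cons c rest =>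
      by_cases hc : c = '\n'
      · subst hc
        rw [PySem.Chars.splitOn.go]
        simp only [List.isPrefixOf, BEq.rfl, Bool.true_and, if_pos]
        simp only [List.length_cons] at hl
        rw [show List.drop ['\n'].length ('\n' :: rest) = rest from by simp]
        rw [ih rest [] _ (by omega)]
        simp [pvSplit]
      · rw [PySem.Chars.splitOn.go]
        have : List.isPrefixOf ['\n'] (c :: rest) = false := by
          simp [List.isPrefixOf]; exact fun h => (hc h.symm).elim
        rw [this]
        simp only [Bool.false_eq_true, if_false]
        rw [ih rest (c :: cur) accs (by simpa using Nat.lt_succ_iff.mp (by simpa using hl))]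
        simp [pvSplit, hc]

theorem splitOn_eq (cs : List Char) : PySem.Chars.splitOn cs ['\n'] = pvSplit [] cs := by
  unfold PySem.Chars.splitOn
  rw [splitOn_go_eq cs.length.succ cs [] [] (by omega)]
  simp

theorem pvSplit_ne_nil (cs : List Char) (pre : List Char) : pvSplit pre cs ≠ [] := by
  induction cs generalizing pre with
  | nil => simp [pvSplit]
  | cons c rest ih => by_cases h : c = '\n' <;> simp [pvSplit, h, ih]

theorem pvSplit_no_nl (cs : List Char) : ∀ pre, cs.dropWhile (· ≠ '\n') = [] →
    pvSplit pre cs = [pre ++ cs] := by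
  induction cs with
  | nil => intro pre _; simp [pvSplit]
  | cons c rest ih =>
    intro pre h
    by_cases hc : c = '\n'
    · simp [List.dropWhile_cons, hc] at h
    · rw [List.dropWhile_cons, if_pos (by simp [hc])] at h
      simp [pvSplit, hc, ih _ h]

theorem pvSplit_nl (cs : List Char) : ∀ (pre : List Char) (c : Char) (rest : List Char),
    cs.dropWhile (· ≠ '\n') = c :: rest →
    pvSplit pre cs = (pre ++ cs.takeWhile (· ≠ '\n')) :: pvSplit [] rest := by
  induction cs with
  | nil => intro pre c rest h; simp at h
  | cons a tl ih =>
    intro pre c rest h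
    by_cases ha : a = '\n'
    · subst ha
      rw [List.dropWhile_cons, if_neg (by simp)] at h
      cases h
      simp [pvSplit, List.takeWhile_cons]
    · rw [List.dropWhile_cons, if_pos (by simp [ha])] at h
      rw [show pvSplit pre (a :: tl) = pvSplit (pre ++ [a]) tl by simp [pvSplit, ha]]
      rw [ih _ _ _ h]
      simp [List.takeWhile_cons, ha]

theorem take4_spaces (cs : List Char) (h : cs.take 4 = [' ', ' ', ' ', ' ']) :
    cs = ' ' :: ' ' :: ' ' :: ' ' :: cs.drop 4 := by
  conv_lhs => rw [← List.take_append_drop 4 cs, h]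
  rfl

theorem stripped_dropWhile (cs : List Char) :
    (if cs.take 4 = [' ', ' ', ' ', ' '] then cs.drop 4 else cs).dropWhile (· ≠ '\n')
      = cs.dropWhile (· ≠ '\n') := by
  by_cases h4 : cs.take 4 = [' ', ' ', ' ', ' ']
  · rw [if_pos h4]
    conv_rhs => rw [take4_spaces cs h4]
    simp [List.dropWhile_cons]
  · rw [if_neg h4]

theorem takeWhile_prefix_take4 (cs : List Char)
    (h : (cs.takeWhile (· ≠ '\n')).take 4 = [' ', ' ', ' ', ' ']) :
    cs.take 4 = [' ', ' ', ' ', ' '] := by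
  have hlen : 4 ≤ (cs.takeWhile (· ≠ '\n')).length := by
    have h2 : min 4 (cs.takeWhile (· ≠ '\n')).length = 4 := by
      simpa using congrArg List.length h
    omega
  obtain ⟨t, ht⟩ := List.takeWhile_prefix (l := cs) (fun c => decide (c ≠ '\n'))
  rw [← ht, List.take_append_of_le_length hlen, h]

theorem lineF_takeWhile (cs : List Char) :
    pvLineF (cs.takeWhile (· ≠ '\n'))
      = (if cs.take 4 = [' ', ' ', ' ', ' '] then cs.drop 4 else cs).takeWhile (· ≠ '\n') := by
  by_cases h4 : cs.take 4 = [' ', ' ', ' ', ' ']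
  · rw [if_pos h4]
    conv_rhs => rw [take4_spaces cs h4]
    conv_lhs => rw [take4_spaces cs h4]
    simp [List.takeWhile_cons, pvLineF]
  · rw [if_neg h4]
    unfold pvLineF
    rw [if_neg (fun hcon => h4 (takeWhile_prefix_take4 cs hcon))]

theorem foldl_push (lines : List (List Char)) (init : List (List Char)) :
    lines.foldl (fun acc line => acc ++ [pvLineF line]) init = init ++ lines.map pvLineF := by
  induction lines generalizing init with
  | nil => simp
  | cons l ls ih => simp [List.foldl_cons, ih]

theorem stripIndentScan_eq (cs : List Char) :
    stripIndentScan cs = PySem.Chars.join ['\n'] ((pvSplit [] cs).map pvLineF) := by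
  fun_induction stripIndentScan cs with
  | case1 cs cs1 h =>
    have hcs1 : cs1 = if cs.take 4 = [' ', ' ', ' ', ' '] then cs.drop 4 else cs := by
      simp only [cs1, dite_eq_ite]
    rw [hcs1] at h ⊢
    rw [pvSplit_no_nl cs [] (by rw [← stripped_dropWhile cs]; exact h)]
    simp only [List.map_cons, List.map_nil, PySem.Chars.join_singleton, List.nil_append]
    rfl
  | case2 cs cs1 c rest h ih =>
    have hcs1 : cs1 = if cs.take 4 = [' ', ' ', ' ', ' '] then cs.drop 4 else cs := by
      simp only [cs1, dite_eq_ite]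
    rw [hcs1] at h ⊢
    rw [pvSplit_nl cs [] c rest (by rw [← stripped_dropWhile cs]; exact h)]
    obtain ⟨p, ps, hps⟩ : ∃ p ps, pvSplit [] rest = p :: ps := by
      cases hx : pvSplit [] rest with
      | nil => exact absurd hx (pvSplit_ne_nil rest [])
      | cons p ps => exact ⟨p, ps, rfl⟩
    rw [List.map_cons, hps, List.map_cons, PySem.Chars.join_cons_cons]
    rw [← List.map_cons, ← hps, ← ih]
    rw [List.nil_append, lineF_takeWhile cs]
    simp

theorem ports_agree (text : String) :
    format_text_indentation text = format_text_indentation_alt text := by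
  unfold format_text_indentation format_text_indentation_alt
  have hsep : "\n".toList = ['\n'] := by decide
  have hsp : "    ".toList = [' ', ' ', ' ', ' '] := by decide
  have hfun : (fun (acc : List (List Char)) line =>
      if PySem.Chars.slice line none (some 4) = "    ".toList then
        acc ++ [PySem.Chars.slice line (some 4) none]
      else acc ++ [line]) = fun acc line => acc ++ [pvLineF line] := by
    funext acc line
    rw [PySem.Chars.slice_eq_listSlice, PySem.Chars.slice_eq_listSlice,
      PySem.List.slice_to _ (by norm_num), PySem.List.slice_from _ (by norm_num), hsp]
    simp only [show Int.toNat 4 = 4 from rfl, pvLineF]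
    split <;> simp_all
  rw [hsep, splitOn_eq, hfun, foldl_push, List.nil_append, stripIndentScan_eq]

-- ===== VERDICT (by name: the statement is the Claim_ definition above) =====
theorem format_text_indentation_spec : Claim_equal_format_text_indentation := by
  intro text _
  exact ports_agree text
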